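-- pv_equiv track=rewrite | github.com/EllisD1974/adventofcode | 2025/day2/day2_pt1.py | has_sequential_double_pattern
-- ===== SOURCE A (Python) =====
-- def has_sequential_double_pattern(text: str) -> bool:
--     for size in range(1, len(text)//2 + 1):
--         for i in range(len(text) - 2 * size + 1):
--             pattern = text[i:i+size]
--             next_pattern = text[i+size:i+2*size]
--
--             if pattern == next_pattern:
--                 # Ensure it does NOT repeat more than twice
--                 third_start = i + 2 * size
--                 if third_start + size <= len(text) and text[third_start:third_start+size] == pattern:
--                     continue  # skips if more than twice
--
--                 return True
--     return False
-- ===== SOURCE B (Python) =====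
-- def has_sequential_double_pattern(text: str) -> bool:
--     # O(n^2): for each size, precompute run lengths r[j] = length of the longest
--     # stretch starting at j on which text[j] == text[j+size]; then a double at i
--     # is r[i] >= size, and a third copy exists iff r[i] >= 2*size (and it fits).
--     n = len(text)
--     for size in range(1, n // 2 + 1):
--         m = n - size
--         r = [0] * (m + 1)
--         for j in range(m - 1, -1, -1):
--             r[j] = r[j + 1] + 1 if text[j] == text[j + size] else 0
--         for i in range(n - 2 * size + 1):
--             if r[i] >= size and not (i + 3 * size <= n and r[i] >= 2 * size):
--                 return True
--     return False
-- ===== Notes on version B (the rewrite author's own statement) =====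
-- stated objective: faster
-- what changed: Replaces the per-position substring comparisons by a per-size run-length table r[j] (longest stretch with text[j]==text[j+size]) computed once right-to-left, so each (size,i) test is O(1) instead of O(size); intended as asymptotically faster (worst case O(n^2) vs O(n^3)), measured ~1.4-1.6x on the probe's near-linear constant-string inputs.
import Mathlib
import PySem

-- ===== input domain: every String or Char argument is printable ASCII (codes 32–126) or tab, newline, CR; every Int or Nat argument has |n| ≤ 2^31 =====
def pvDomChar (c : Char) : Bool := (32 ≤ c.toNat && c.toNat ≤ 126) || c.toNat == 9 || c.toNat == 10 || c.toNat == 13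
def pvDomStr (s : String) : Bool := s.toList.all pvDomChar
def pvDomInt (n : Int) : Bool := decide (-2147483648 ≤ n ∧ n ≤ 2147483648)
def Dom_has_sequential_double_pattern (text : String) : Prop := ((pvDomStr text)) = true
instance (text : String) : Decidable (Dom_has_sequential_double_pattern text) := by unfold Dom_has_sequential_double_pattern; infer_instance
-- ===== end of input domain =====

-- B replaces A's per-candidate substring comparisons by a per-size run-length table
-- (longest stretch with text[j] == text[j+size]); worst-case O(n^2) vs A's O(n^3)
-- (on a timing run's constant-string inputs, where both are near-linear, measured ~1.4-1.6x).

-- ===== PORT A =====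
-- body of A's inner loop: pattern/next comparison and the "not thrice" check
def pvAcond (cs : List Char) (size i : Nat) : Bool :=
  let pattern := PySem.List.slice cs (some (i : Int)) (some ((i : Int) + (size : Int)))
  let next_pattern := PySem.List.slice cs (some ((i : Int) + (size : Int))) (some ((i : Int) + (size : Int) + (size : Int)))
  pattern == next_pattern &&
    !(decide (i + 2 * size + size ≤ cs.length) &&
      (PySem.List.slice cs (some ((i : Int) + 2 * (size : Int))) (some ((i : Int) + 2 * (size : Int) + (size : Int))) == pattern))

def has_sequential_double_pattern (text : String) : Bool :=
  let cs := text.toList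
  (List.range (cs.length / 2)).any fun s0 =>
    (List.range (cs.length - 2 * (s0 + 1) + 1)).any fun i =>
      pvAcond cs (s0 + 1) i

-- ===== PORT B =====
-- r[j] of Source B, computed by the same right-to-left recurrence
def pvRun (cs : List Char) (size : Nat) (j : Nat) : Nat :=
  if h : j + size < cs.length then
    (if cs[j]'(by omega) = cs[j + size]'h then pvRun cs size (j + 1) + 1 else 0)
  else 0
termination_by cs.length - j

def has_sequential_double_pattern_alt (text : String) : Bool :=
  let cs := text.toList
  (List.range (cs.length / 2)).any fun s0 =>
    let size := s0 + 1
    (List.range (cs.length - 2 * size + 1)).any fun i =>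
      decide (size ≤ pvRun cs size i) &&
        !(decide (i + 3 * size ≤ cs.length) && decide (2 * size ≤ pvRun cs size i))

-- ===== PRECONDITION & SPEC =====
def Spec_has_sequential_double_pattern (text : String) (out : Bool) : Prop := out = has_sequential_double_pattern_alt text
instance (text : String) (out : Bool) : Decidable (Spec_has_sequential_double_pattern text out) := by unfold Spec_has_sequential_double_pattern; infer_instance

-- ===== CLAIM (what is proved, stated in full; the proofs are below) =====
def Claim_equal_has_sequential_double_pattern : Prop := ∀ (text : String), Dom_has_sequential_double_pattern text → Spec_has_sequential_double_pattern text (has_sequential_double_pattern text)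

-- ===== LEMMAS AND PROOFS =====

theorem pv_any_congr {α : Type} (l : List α) (f g : α → Bool)
    (h : ∀ x ∈ l, f x = g x) : l.any f = l.any g := by
  induction l with
  | nil => rfl
  | cons a t ih =>
      simp only [List.any_cons, h a (List.mem_cons_self), ih (fun x hx => h x (List.mem_cons_of_mem a hx))]

-- k ≤ pvRun cs s i ⟺ the next k positions agree with their shift by s
theorem pvRun_iff (cs : List Char) (s : Nat) (k : Nat) :
    ∀ i, i + k + s ≤ cs.length →
      (k ≤ pvRun cs s i ↔ ∀ j < k, cs[i + j]? = cs[i + s + j]?) := by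
  induction k with
  | zero => intro i _; simp
  | succ k ih =>
      intro i hb
      have hlt : i + s < cs.length := by omega
      have hi : i < cs.length := by omega
      rw [pvRun]
      rw [dif_pos hlt]
      by_cases heq : cs[i]'(by omega) = cs[i + s]'hlt
      · rw [if_pos heq]
        have ih' := ih (i + 1) (by omega)
        constructor
        · intro hk j hj
          rcases Nat.eq_zero_or_pos j with rfl | hjpos
          · simp only [Nat.add_zero]
            rw [List.getElem?_eq_getElem hi, List.getElem?_eq_getElem hlt, heq]
          · have hk' : k ≤ pvRun cs s (i + 1) := by omega
            have h := (ih'.mp hk') (j - 1) (by omega)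
            have e1 : i + 1 + (j - 1) = i + j := by omega
            have e2 : i + 1 + s + (j - 1) = i + s + j := by omega
            rwa [e1, e2] at h
        · intro hall
          have hk' : k ≤ pvRun cs s (i + 1) := by
            apply ih'.mpr
            intro j hj
            have h := hall (j + 1) (by omega)
            have e1 : i + (j + 1) = i + 1 + j := by omega
            have e2 : i + s + (j + 1) = i + 1 + s + j := by omega
            rwa [e1, e2] at h
          omega
      · rw [if_neg heq]
        constructor
        · intro h; omega
        · intro hall
          exfalso
          have h := hall 0 (by omega)
          simp only [Nat.add_zero] at h
          rw [List.getElem?_eq_getElem hi, List.getElem?_eq_getElem hlt] at h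
          exact heq (Option.some.injEq _ _ ▸ h)

-- slice equality is pointwise agreement of the two windows
theorem pv_slice_eq_iff (cs : List Char) (a b k : Nat) :
    (PySem.List.slice cs (some (a : Int)) (some ((a : Int) + (k : Int))) =
       PySem.List.slice cs (some (b : Int)) (some ((b : Int) + (k : Int)))) ↔
    ∀ j < k, cs[a + j]? = cs[b + j]? := by
  rw [PySem.List.slice_natCast_add, PySem.List.slice_natCast_add]
  constructor
  · intro h j hj
    have h2 := congrArg (fun l => l[j]?) h
    simpa [List.getElem?_take, List.getElem?_drop, hj] using h2
  · intro hall
    apply List.ext_getElem?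
    intro j
    by_cases hj : j < k
    · simpa [List.getElem?_take, List.getElem?_drop, hj] using hall j hj
    · simp [hj]

theorem pv_cond_eq (cs : List Char) (s i : Nat) (hb : i + 2 * s ≤ cs.length) :
    pvAcond cs s i =
      (decide (s ≤ pvRun cs s i) &&
        !(decide (i + 3 * s ≤ cs.length) && decide (2 * s ≤ pvRun cs s i))) := by
  have hd : (i : Int) + (s : Int) + (s : Int) = ((i + s : Nat) : Int) + ((s : Nat) : Int) := by push_cast; ring
  have hd2 : (i : Int) + 2 * (s : Int) = ((i + 2 * s : Nat) : Int) := by push_cast; ring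
  have e1 : (PySem.List.slice cs (some (i : Int)) (some ((i : Int) + (s : Int))) ==
      PySem.List.slice cs (some ((i : Int) + (s : Int))) (some ((i : Int) + (s : Int) + (s : Int)))) =
      decide (∀ j < s, cs[i + j]? = cs[i + s + j]?) := by
    rw [hd, Bool.eq_iff_iff]
    simp only [beq_iff_eq, decide_eq_true_eq]
    exact pv_slice_eq_iff cs i (i + s) s
  have e2 : (PySem.List.slice cs (some ((i : Int) + 2 * (s : Int))) (some ((i : Int) + 2 * (s : Int) + (s : Int))) ==
      PySem.List.slice cs (some (i : Int)) (some ((i : Int) + (s : Int)))) =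
      decide (∀ j < s, cs[i + 2 * s + j]? = cs[i + j]?) := by
    rw [hd2, Bool.eq_iff_iff]
    simp only [beq_iff_eq, decide_eq_true_eq]
    exact pv_slice_eq_iff cs (i + 2 * s) i s
  have hr1 : (s ≤ pvRun cs s i) ↔ ∀ j < s, cs[i + j]? = cs[i + s + j]? :=
    pvRun_iff cs s s i (by omega)
  have hcc : decide (i + 2 * s + s ≤ cs.length) = decide (i + 3 * s ≤ cs.length) := by
    simp only [decide_eq_decide]; omega
  simp only [pvAcond]
  rw [e1, e2, hcc]
  by_cases h1 : ∀ j < s, cs[i + j]? = cs[i + s + j]?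
  · rw [decide_eq_true h1, decide_eq_true ((hr1.mpr h1))]
    simp only [Bool.true_and]
    by_cases hc : i + 3 * s ≤ cs.length
    · have hr2 : (2 * s ≤ pvRun cs s i) ↔ ∀ j < 2 * s, cs[i + j]? = cs[i + s + j]? :=
        pvRun_iff cs s (2 * s) i (by omega)
      have hPQ : (∀ j < s, cs[i + 2 * s + j]? = cs[i + j]?) ↔
          (∀ j < 2 * s, cs[i + j]? = cs[i + s + j]?) := by
        constructor
        · intro h3 j hj
          by_cases hjs : j < s
          · exact h1 j hjs
          · have hj' : j - s < s := by omega
            have a1 := h1 (j - s) hj'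
            have a2 := h3 (j - s) hj'
            have f1 : i + j = i + s + (j - s) := by omega
            have f2 : i + s + j = i + 2 * s + (j - s) := by omega
            rw [f1, f2]
            exact a1.symm.trans a2.symm
        · intro hQ j hj
          have a1 := hQ j (by omega)
          have a2 := hQ (s + j) (by omega)
          have f1 : i + (s + j) = i + s + j := by omega
          have f2 : i + s + (s + j) = i + 2 * s + j := by omega
          rw [f1, f2] at a2
          exact (a1.trans a2).symm
      rw [decide_eq_true hc]
      have : decide (∀ j < s, cs[i + 2 * s + j]? = cs[i + j]?) = decide (2 * s ≤ pvRun cs s i) := by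
        simp only [decide_eq_decide]
        exact hPQ.trans hr2.symm
      rw [this]
    · rw [decide_eq_false hc]
      simp
  · have h1' : ¬ (s ≤ pvRun cs s i) := fun h => h1 (hr1.mp h)
    rw [decide_eq_false h1, decide_eq_false h1']
    simp

-- ===== VERDICT (by name: the statement is the Claim_ definition above) =====
theorem has_sequential_double_pattern_spec : Claim_equal_has_sequential_double_pattern := by
  intro text _
  unfold Spec_has_sequential_double_pattern has_sequential_double_pattern has_sequential_double_pattern_alt
  apply pv_any_congr
  intro s0 hs0
  apply pv_any_congr
  intro i hi
  simp only [List.mem_range] at hs0 hi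
  exact pv_cond_eq text.toList (s0 + 1) i (by omega)
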